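-- pv_equiv track=rewrite | github.com/Grozby/out-loud | advent_of_code/2024/day7.py | is_equation_valid
-- ===== SOURCE A (Python) =====
-- def is_equation_valid(test_value: int, current: int, remaining: list[int]):
--     if len(remaining) == 0:
--         if test_value == current:
--             return True
--         return False
--
--     return is_equation_valid(
--         test_value=test_value,
--         current=current + remaining[0],
--         remaining=remaining[1:],
--     ) or is_equation_valid(
--         test_value=test_value,
--         current=current * remaining[0],
--         remaining=remaining[1:],
--     )
-- ===== SOURCE B (Python) =====
-- def is_equation_valid(test_value: int, current: int, remaining: list[int]):
--     states = {current}
--     for n in remaining: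
--         states = {v + n for v in states} | {v * n for v in states}
--     return test_value in states
-- ===== Notes on version B (the rewrite author's own statement) =====
-- stated objective: alternative
-- what changed: Replaces the two-way recursion with a single iterative forward pass maintaining a set of reachable partial values, returning membership of test_value at the end.
import Mathlib
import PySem

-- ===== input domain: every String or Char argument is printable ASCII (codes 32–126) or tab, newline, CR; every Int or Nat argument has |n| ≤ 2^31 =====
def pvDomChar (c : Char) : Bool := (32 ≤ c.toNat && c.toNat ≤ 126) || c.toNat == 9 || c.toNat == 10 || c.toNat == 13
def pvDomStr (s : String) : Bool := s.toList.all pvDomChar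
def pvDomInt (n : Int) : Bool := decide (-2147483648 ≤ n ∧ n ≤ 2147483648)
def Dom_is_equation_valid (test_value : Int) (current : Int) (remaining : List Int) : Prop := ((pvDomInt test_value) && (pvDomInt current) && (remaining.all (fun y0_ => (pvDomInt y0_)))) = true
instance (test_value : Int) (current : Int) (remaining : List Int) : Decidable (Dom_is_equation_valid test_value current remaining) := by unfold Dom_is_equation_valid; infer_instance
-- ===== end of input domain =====

-- B replaces A's two-way recursion by one forward pass over `remaining` maintaining the set of
-- reachable partial values; same boolean result (alternative decomposition, no speed claim).

-- ===== PORT A =====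
def is_equation_valid (test_value : Int) (current : Int) (remaining : List Int) : Bool :=
  match remaining with
  | [] => if test_value == current then true else false
  | n :: rest =>
      is_equation_valid test_value (current + n) rest ||
      is_equation_valid test_value (current * n) rest

-- ===== PORT B =====
-- one loop step: states = {v + n for v in states} | {v * n for v in states}
def pvStep (states : PySem.Set Int) (n : Int) : PySem.Set Int :=
  PySem.Set.union (PySem.Set.ofList (states.map (fun v => v + n))) (states.map (fun v => v * n))

def is_equation_valid_alt (test_value : Int) (current : Int) (remaining : List Int) : Bool :=
  PySem.Set.contains (remaining.foldl pvStep (PySem.Set.ofList [current])) test_value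

-- ===== PRECONDITION & SPEC =====
def Spec_is_equation_valid (test_value : Int) (current : Int) (remaining : List Int) (out : Bool) : Prop := out = is_equation_valid_alt test_value current remaining
instance (test_value : Int) (current : Int) (remaining : List Int) (out : Bool) : Decidable (Spec_is_equation_valid test_value current remaining out) := by unfold Spec_is_equation_valid; infer_instance

-- ===== CLAIM (what is proved, stated in full; the proofs are below) =====
def Claim_equal_is_equation_valid : Prop := ∀ (test_value : Int) (current : Int) (remaining : List Int), Dom_is_equation_valid test_value current remaining → Spec_is_equation_valid test_value current remaining (is_equation_valid test_value current remaining)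

-- ===== LEMMAS AND PROOFS =====

theorem mem_pvStep (S : PySem.Set Int) (n x : Int) :
    x ∈ pvStep S n ↔ ∃ v ∈ S, x = v + n ∨ x = v * n := by
  unfold pvStep
  rw [PySem.Set.mem_union, PySem.Set.mem_ofList]
  simp only [List.mem_map]
  constructor
  · rintro (⟨v, hv, rfl⟩ | ⟨v, hv, rfl⟩) <;> exact ⟨v, hv, by simp⟩
  · rintro ⟨v, hv, rfl | rfl⟩
    · exact Or.inl ⟨v, hv, rfl⟩
    · exact Or.inr ⟨v, hv, rfl⟩

theorem foldl_pvStep_mem (remaining : List Int) (S : PySem.Set Int) (t : Int) :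
    t ∈ remaining.foldl pvStep S ↔ ∃ c ∈ S, is_equation_valid t c remaining = true := by
  induction remaining generalizing S with
  | nil =>
      simp only [List.foldl_nil, is_equation_valid]
      constructor
      · intro h; exact ⟨t, h, by simp⟩
      · rintro ⟨c, hc, h⟩
        have : t = c := by simpa using h
        simpa [this] using hc
  | cons n rest ih =>
      simp only [List.foldl_cons]
      rw [ih]
      constructor
      · rintro ⟨c', hc', hval⟩
        rw [mem_pvStep] at hc'
        obtain ⟨v, hv, rfl | rfl⟩ := hc' <;>
          exact ⟨v, hv, by simp [is_equation_valid, hval]⟩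
      · rintro ⟨c, hc, hval⟩
        simp only [is_equation_valid, Bool.or_eq_true] at hval
        rcases hval with h | h
        · exact ⟨c + n, (mem_pvStep _ _ _).mpr ⟨c, hc, Or.inl rfl⟩, h⟩
        · exact ⟨c * n, (mem_pvStep _ _ _).mpr ⟨c, hc, Or.inr rfl⟩, h⟩

-- ===== VERDICT (by name: the statement is the Claim_ definition above) =====
theorem is_equation_valid_spec : Claim_equal_is_equation_valid := by
  intro t c r _
  unfold Spec_is_equation_valid is_equation_valid_alt
  rw [Bool.eq_iff_iff, PySem.Set.contains_iff, foldl_pvStep_mem]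
  constructor
  · intro h; exact ⟨c, by simp [PySem.Set.mem_ofList], h⟩
  · rintro ⟨c', hc', h⟩
    have : c' = c := by simpa [PySem.Set.mem_ofList] using hc'
    rwa [this] at h
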